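-- pv_equiv track=rewrite | github.com/mirandasong24/cs3245-hw4 | search.py | filter_two_lists_by_common_docIDs
-- ===== SOURCE A (Python) =====
-- def filter_two_lists_by_common_docIDs(lst1, lst2):
--     modified_lst1 = []
--     modified_lst2 = []
--     for item1 in lst1:
--         for item2 in lst2:
--             if item1[0] == item2[0]:  # Assuming docID is type int
--                 modified_lst1.append(item1)
--                 modified_lst2.append(item2)
--     return [modified_lst1, modified_lst2]
-- ===== SOURCE B (Python) =====
-- def filter_two_lists_by_common_docIDs(lst1, lst2):
--     # Hash-join: bucket lst2 by docID once, then a single pass over lst1.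
--     buckets = {}
--     for item2 in lst2:
--         buckets.setdefault(item2[0], []).append(item2)
--     modified_lst1 = []
--     modified_lst2 = []
--     for item1 in lst1:
--         b = buckets.get(item1[0], [])
--         modified_lst1 += [item1] * len(b)
--         modified_lst2 += b
--     return [modified_lst1, modified_lst2]
-- ===== Notes on version B (the rewrite author's own statement) =====
-- stated objective: alternative
-- what changed: Replaces the nested per-item scan of lst2 with a hash join: lst2 is bucketed by docID into a dict once, then a single pass over lst1 emits each item together with its bucket.
-- outside the precondition, e.g. on filter_two_lists_by_common_docIDs([], [[]]): A returns [[], []], B raises IndexError; on filter_two_lists_by_common_docIDs([[]], []): A returns [[], []], B raises IndexError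
import Mathlib
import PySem

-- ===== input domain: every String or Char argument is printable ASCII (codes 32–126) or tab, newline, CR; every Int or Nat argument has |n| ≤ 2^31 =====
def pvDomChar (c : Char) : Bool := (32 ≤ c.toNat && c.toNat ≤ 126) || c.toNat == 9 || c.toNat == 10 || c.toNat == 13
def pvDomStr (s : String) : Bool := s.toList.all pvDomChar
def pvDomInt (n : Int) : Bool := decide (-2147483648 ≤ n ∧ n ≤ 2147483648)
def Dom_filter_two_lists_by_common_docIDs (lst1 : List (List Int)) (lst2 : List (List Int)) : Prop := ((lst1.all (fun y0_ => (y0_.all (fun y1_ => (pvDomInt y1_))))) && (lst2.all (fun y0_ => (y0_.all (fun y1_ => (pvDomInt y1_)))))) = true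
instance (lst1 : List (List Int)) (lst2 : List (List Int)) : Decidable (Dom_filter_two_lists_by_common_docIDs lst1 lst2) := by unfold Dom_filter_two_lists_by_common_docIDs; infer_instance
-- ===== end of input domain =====

-- B restructures A: instead of a nested scan, it buckets lst2 by docID into a dict and makes one pass over lst1 (hash join); equal output proved on Pre_.


-- ===== PORT A =====
def filter_two_lists_by_common_docIDs (lst1 : List (List Int)) (lst2 : List (List Int)) : List (List (List Int)) :=
  -- item1[0] / item2[0]: total via pyGetD; Pre_ guarantees the index is in range wherever Python evaluates it
  let acc := lst1.foldl (fun acc item1 =>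
    lst2.foldl (fun (acc : List (List Int) × List (List Int)) item2 =>
      if PySem.List.pyGetD item1 0 (0:Int) = PySem.List.pyGetD item2 0 (0:Int) then
        (acc.1 ++ [item1], acc.2 ++ [item2])
      else acc) acc) (([], []) : List (List Int) × List (List Int))
  [acc.1, acc.2]

-- ===== PORT B =====
def filter_two_lists_by_common_docIDs_alt (lst1 : List (List Int)) (lst2 : List (List Int)) : List (List (List Int)) :=
  let buckets := lst2.foldl (fun d item2 =>
    d.modify (PySem.List.pyGetD item2 0 (0:Int)) [] (· ++ [item2]))
    (PySem.Dict.empty : PySem.Dict Int (List (List Int)))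
  let acc := lst1.foldl (fun (acc : List (List Int) × List (List Int)) item1 =>
    let b := buckets.getD (PySem.List.pyGetD item1 0 (0:Int)) []
    (acc.1 ++ List.replicate b.length item1, acc.2 ++ b)) ([], [])
  [acc.1, acc.2]

-- ===== PRECONDITION & SPEC =====
-- Pre_ excludes inputs containing an empty inner list: whenever both outer lists are nonempty A raises
-- IndexError there, and in the remaining corner (the other outer list empty, so A short-circuits to [[],[]])
-- B's own indexing pass raises, so these inputs are excluded rather than matched.
def Pre_filter_two_lists_by_common_docIDs (lst1 : List (List Int)) (lst2 : List (List Int)) : Prop :=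
  (∀ x ∈ lst1, x ≠ []) ∧ (∀ y ∈ lst2, y ≠ [])
instance (lst1 : List (List Int)) (lst2 : List (List Int)) : Decidable (Pre_filter_two_lists_by_common_docIDs lst1 lst2) := by unfold Pre_filter_two_lists_by_common_docIDs; infer_instance
def pvWitness_filter_two_lists_by_common_docIDs : List (List Int) × List (List Int) :=
  ([[1, 5], [2, 6], [1, 7]], [[1, 9], [3, 0], [1, 8], [2, 2]])
def Spec_filter_two_lists_by_common_docIDs (lst1 : List (List Int)) (lst2 : List (List Int)) (out : List (List (List Int))) : Prop := out = filter_two_lists_by_common_docIDs_alt lst1 lst2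
instance (lst1 : List (List Int)) (lst2 : List (List Int)) (out : List (List (List Int))) : Decidable (Spec_filter_two_lists_by_common_docIDs lst1 lst2 out) := by unfold Spec_filter_two_lists_by_common_docIDs; infer_instance

-- ===== CLAIM (what is proved, stated in full; the proofs are below) =====
def Claim_equal_filter_two_lists_by_common_docIDs : Prop := ∀ (lst1 : List (List Int)) (lst2 : List (List Int)), Dom_filter_two_lists_by_common_docIDs lst1 lst2 → Pre_filter_two_lists_by_common_docIDs lst1 lst2 → Spec_filter_two_lists_by_common_docIDs lst1 lst2 (filter_two_lists_by_common_docIDs lst1 lst2)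

-- ===== LEMMAS AND PROOFS =====

-- the dict of buckets looks up to the sublist of lst2 whose docID is k
theorem pv_bucket_lookup (lst2 : List (List Int)) (k : Int) :
    (lst2.foldl (fun d item2 =>
        d.modify (PySem.List.pyGetD item2 0 (0:Int)) [] (· ++ [item2]))
      (PySem.Dict.empty : PySem.Dict Int (List (List Int)))).getD k []
    = lst2.filter (fun i => PySem.List.pyGetD i 0 (0:Int) == k) := by
  have hmap : lst2.foldl (fun d item2 =>
        d.modify (PySem.List.pyGetD item2 0 (0:Int)) [] (· ++ [item2]))
      (PySem.Dict.empty : PySem.Dict Int (List (List Int)))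
    = (lst2.map (fun i => (PySem.List.pyGetD i 0 (0:Int), i))).foldl
        (fun d p => d.modify p.1 [] (· ++ [p.2])) PySem.Dict.empty :=
    (List.foldl_map (f := fun i : List Int => (PySem.List.pyGetD i 0 (0:Int), i))
      (g := fun (d : PySem.Dict Int (List (List Int))) (p : Int × List Int) =>
        d.modify p.1 [] (· ++ [p.2]))).symm
  rw [hmap, PySem.Dict.getD_foldl_modify_append]
  simp [List.filter_map, Function.comp_def]

-- A's inner loop over lst2 appends item1 once per match and the matches themselves
theorem pv_inner_loop (item1 : List Int) (lst2 : List (List Int))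
    (acc : List (List Int) × List (List Int)) :
    lst2.foldl (fun (acc : List (List Int) × List (List Int)) item2 =>
      if PySem.List.pyGetD item1 0 (0:Int) = PySem.List.pyGetD item2 0 (0:Int) then
        (acc.1 ++ [item1], acc.2 ++ [item2])
      else acc) acc
    = (acc.1 ++ List.replicate (lst2.filter
          (fun i => PySem.List.pyGetD i 0 (0:Int) == PySem.List.pyGetD item1 0 (0:Int))).length item1,
       acc.2 ++ lst2.filter
          (fun i => PySem.List.pyGetD i 0 (0:Int) == PySem.List.pyGetD item1 0 (0:Int))) := by
  induction lst2 generalizing acc with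
  | nil => simp
  | cons a t ih =>
    simp only [List.foldl_cons, List.filter_cons]
    by_cases h : PySem.List.pyGetD item1 0 (0:Int) = PySem.List.pyGetD a 0 (0:Int)
    · rw [if_pos h, ih]
      simp [h.symm, List.replicate_succ, List.append_assoc]
    · rw [if_neg h, ih]
      have h' : ¬ PySem.List.pyGetD a 0 (0:Int) = PySem.List.pyGetD item1 0 (0:Int) :=
        fun e => h e.symm
      simp [beq_iff_eq, h']

-- ===== VERDICT (by name: the statement is the Claim_ definition above) =====
theorem filter_two_lists_by_common_docIDs_spec : Claim_equal_filter_two_lists_by_common_docIDs := by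
  intro lst1 lst2 _ _
  unfold Spec_filter_two_lists_by_common_docIDs filter_two_lists_by_common_docIDs
    filter_two_lists_by_common_docIDs_alt
  simp only [pv_inner_loop, pv_bucket_lookup]
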